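-- pv_equiv track=rewrite | github.com/GoogolFisch/not-shell | Win.py | true_split
-- ===== SOURCE A (Python) =====
-- def true_split(message,spliting=" ",doBreak=(">",)) -> list:
-- 	m = [""]
-- 	b = False
-- 	for x in message:
-- 		if x in doBreak and not b:
-- 			b = True
-- 		elif x in spliting and not b:
-- 			m.append("")
-- 		else:
-- 			b = False
-- 			m[-1] += x
-- 	return m
-- ===== SOURCE B (Python) =====
-- def true_split(message, spliting=" ", doBreak=(">",)) -> list:
--     # Stage 1: resolve escapes into a token stream (char, is_literal)
--     tokens = []
--     it = iter(message)
--     for c in it: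
--         if c in doBreak:
--             nxt = next(it, None)
--             if nxt is not None:
--                 tokens.append((nxt, True))
--         else:
--             tokens.append((c, False))
--     # Stage 2: split the token stream on non-literal separators
--     words = [""]
--     for ch, lit in tokens:
--         if not lit and ch in spliting:
--             words.append("")
--         else:
--             words[-1] += ch
--     return words
-- ===== Notes on version B (the rewrite author's own statement) =====
-- stated objective: alternative
-- what changed: Replaces A's single-pass boolean escape-flag state machine by two staged passes: a tokenizer that first resolves escapes into (char, is_literal) tokens, then a fold over the token stream that splits on non-literal separators.
import Mathlib
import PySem

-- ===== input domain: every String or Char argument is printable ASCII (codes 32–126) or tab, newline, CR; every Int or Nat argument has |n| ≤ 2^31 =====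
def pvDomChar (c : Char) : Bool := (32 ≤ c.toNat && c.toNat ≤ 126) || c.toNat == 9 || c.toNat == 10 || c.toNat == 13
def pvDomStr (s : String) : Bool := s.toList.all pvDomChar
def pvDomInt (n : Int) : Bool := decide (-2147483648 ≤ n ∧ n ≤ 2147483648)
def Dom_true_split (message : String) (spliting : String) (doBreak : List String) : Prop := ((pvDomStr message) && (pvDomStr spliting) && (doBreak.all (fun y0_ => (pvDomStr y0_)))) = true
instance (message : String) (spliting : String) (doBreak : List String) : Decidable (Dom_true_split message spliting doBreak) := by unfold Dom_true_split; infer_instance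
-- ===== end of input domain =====

-- B replaces A's one-pass escape-flag state machine by two staged passes (escape-resolving tokenizer, then a fold splitting on separators); alternative decomposition, same cost.


-- ===== PORT A =====
-- m[-1] += x on the (always nonempty) list m
def tsAppendLast (m : List String) (c : Char) : List String :=
  m.dropLast ++ [(m.getLast!).push c]

-- the for-x-in-message loop of A, state (m, b)
def tsLoopA (spliting : String) (doBreak : List String) : List String → Bool → List Char → List String
  | m, _, [] => m
  | m, b, x :: rest =>
    if doBreak.contains (String.singleton x) && !b then
      tsLoopA spliting doBreak m true rest
    else if spliting.toList.contains x && !b then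
      tsLoopA spliting doBreak (m ++ [""]) false rest
    else
      tsLoopA spliting doBreak (tsAppendLast m x) false rest

def true_split (message : String) (spliting : String) (doBreak : List String) : List String :=
  tsLoopA spliting doBreak [""] false message.toList

-- ===== PORT B =====
-- stage 1 of B: resolve escapes into a token stream (char, is_literal)
def tsTokens (doBreak : List String) : List Char → List (Char × Bool)
  | [] => []
  | c :: rest =>
    if doBreak.contains (String.singleton c) then
      match rest with
      | [] => []
      | c2 :: rest2 => (c2, true) :: tsTokens doBreak rest2
    else
      (c, false) :: tsTokens doBreak rest

-- stage 2 of B: one fold step of the splitting pass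
def tsStep (spliting : String) (words : List String) (t : Char × Bool) : List String :=
  if !t.2 && spliting.toList.contains t.1 then words ++ [""]
  else words.dropLast ++ [(words.getLast!).push t.1]

def true_split_alt (message : String) (spliting : String) (doBreak : List String) : List String :=
  (tsTokens doBreak message.toList).foldl (tsStep spliting) [""]

-- ===== PRECONDITION & SPEC =====
def Spec_true_split (message : String) (spliting : String) (doBreak : List String) (out : List String) : Prop := out = true_split_alt message spliting doBreak
instance (message : String) (spliting : String) (doBreak : List String) (out : List String) : Decidable (Spec_true_split message spliting doBreak out) := by unfold Spec_true_split; infer_instance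

-- ===== CLAIM (what is proved, stated in full; the proofs are below) =====
def Claim_equal_true_split : Prop := ∀ (message : String) (spliting : String) (doBreak : List String), Dom_true_split message spliting doBreak → Spec_true_split message spliting doBreak (true_split message spliting doBreak)

-- ===== LEMMAS AND PROOFS =====
theorem tsLoop_eq (spliting : String) (doBreak : List String) :
    ∀ (l : List Char) (m : List String),
      tsLoopA spliting doBreak m false l = (tsTokens doBreak l).foldl (tsStep spliting) m := by
  intro l
  induction l using tsTokens.induct (doBreak := doBreak) with
  | case1 => intro m; simp [tsLoopA, tsTokens]
  | case2 c h => intro m; simp_all [tsLoopA, tsTokens]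
  | case3 c c2 rest2 h ih => intro m; simp_all [tsLoopA, tsTokens, tsStep, tsAppendLast]
  | case4 c rest h ih =>
    intro m
    simp only [tsLoopA, Bool.not_false, Bool.and_true, if_neg h]
    conv_rhs => rw [tsTokens.eq_def]
    simp only [if_neg h, List.foldl_cons]
    rw [ih]
    by_cases hs : c ∈ spliting.toList <;> simp [tsStep, tsAppendLast, hs, ih]

-- ===== VERDICT (by name: the statement is the Claim_ definition above) =====
theorem true_split_spec : Claim_equal_true_split := by
  intro message spliting doBreak _
  unfold Spec_true_split true_split true_split_alt
  exact tsLoop_eq spliting doBreak message.toList [""]
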